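-- pv_equiv track=rewrite | github.com/yeshks/applied-crypto | ExamplePaperProblem.py | make_zero_encoding
-- ===== SOURCE A (Python) =====
-- def make_zero_encoding(x, padding=256):
--     x = bin(x)[2:].zfill(padding)  # Pad the binary integer
--     x = x[::-1]  # Reverse the binary integer so the order stays as per the formula specified in the paper
--     zero_encoding = set()  # Initialize an empty set
--     for i in range(len(x)):
--         if x[i] == '0':
--             if x[i + 1:] == '0' * len(x[i + 1:]):
--                 break
--             element = "1" + x[i + 1:]
--             element = element[::-1]
--             zero_encoding.add(int(element, 2))
--     return zero_encoding  # Return the set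
-- ===== SOURCE B (Python) =====
-- def make_zero_encoding(x, padding=256):
--     # Stage 1: build the halving chain x, x//2, x//4, ..., 1.
--     chain = []
--     while x > 0:
--         chain.append(x)
--         x //= 2
--     # Stage 2: every even chain element y marks a zero bit; its encoding is y + 1.
--     return {y + 1 for y in chain if y % 2 == 0}
-- ===== Notes on version B (the rewrite author's own statement) =====
-- stated objective: faster
-- what changed: B is a staged pipeline on the integer itself: first it materialises the halving chain [x, x//2, ..., 1], then a set comprehension keeps the even chain elements y and maps each to y+1; this removes A's padded binary string, its reversal, the per-iteration all-zeros suffix slice, the string concatenation/reversal per element and the int(.,2) re-parse.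
-- outside the precondition, e.g. on make_zero_encoding(-2, 4): A returns {3}, B returns set(); on make_zero_encoding(-1, 256): A returns set(), B returns set(); on make_zero_encoding(-5, 256): A raises ValueError, B returns set()
import Mathlib
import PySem

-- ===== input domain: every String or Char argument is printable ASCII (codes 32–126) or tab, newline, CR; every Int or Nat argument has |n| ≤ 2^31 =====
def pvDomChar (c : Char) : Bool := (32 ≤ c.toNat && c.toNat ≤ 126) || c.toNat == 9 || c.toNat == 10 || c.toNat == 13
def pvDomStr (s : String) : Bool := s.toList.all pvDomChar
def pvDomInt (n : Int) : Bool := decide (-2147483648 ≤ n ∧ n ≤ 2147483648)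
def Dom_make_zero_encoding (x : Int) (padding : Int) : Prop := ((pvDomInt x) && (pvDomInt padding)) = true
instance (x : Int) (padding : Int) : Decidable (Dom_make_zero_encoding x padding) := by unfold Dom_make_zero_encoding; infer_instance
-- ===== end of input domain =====

-- B replaces A's padded-binary-string build / reversal / per-step suffix slicing and int(.,2) re-parse
-- by a staged pipeline: materialise the halving chain [x, x//2, ..., 1], then a comprehension maps the
-- even chain elements y to y+1; objective: faster (measured).


-- ===== PORT A =====
-- bin(n)[2:] digits for a Nat, big-endian; [] for 0 (the 0 case is handled in pyBin)
def pyBinAux (n : Nat) : List Char :=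
  if h : n = 0 then []
  else pyBinAux (n / 2) ++ [if n % 2 = 1 then '1' else '0']
  decreasing_by exact Nat.div_lt_self (Nat.pos_of_ne_zero h) one_lt_two

-- bin(x)[2:] — exact for x ≥ 0 (Pre_ excludes x < 0, where Python's string keeps a stray 'b')
def pyBin (x : Int) : List Char := if x = 0 then ['0'] else pyBinAux x.toNat

-- int(s, 2) on a string of '0'/'1' characters
def parseBin (l : List Char) : Int := l.foldl (fun a c => 2 * a + (if c = '1' then 1 else 0)) 0

-- the for-loop of A: x[i] is the head, x[i+1:] is the tail; break returns the accumulator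
def loopA : List Char → List Int → List Int
  | [], acc => acc
  | c :: rest, acc =>
    if c = '0' then
      if rest = List.replicate rest.length '0' then acc
      else loopA rest (PySem.Set.add acc (parseBin ('1' :: rest).reverse))
    else loopA rest acc

def make_zero_encoding (x : Int) (padding : Int) : List Int :=
  let s := pyBin x
  let s := List.replicate (padding.toNat - s.length) '0' ++ s  -- s.zfill(padding)
  let s := s.reverse                                            -- s[::-1]
  loopA s PySem.Set.empty

-- ===== PORT B =====
-- Stage 1 of Source B: the while-loop building the halving chain [x, x//2, ..., 1]
def chainB (y : Int) : List Int :=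
  if h : 0 < y then y :: chainB (PySem.Int.floordiv y 2) else []
  termination_by y.toNat
  decreasing_by
    have := PySem.Int.floordiv_eq_ediv_of_pos (a := y) (b := 2) (by omega)
    omega

-- Stage 2 of Source B: the set comprehension {y + 1 for y in chain if y % 2 == 0}
def make_zero_encoding_alt (x : Int) (padding : Int) : List Int :=
  PySem.Set.ofList (((chainB x).filter (fun y => PySem.Int.mod y 2 = 0)).map (fun y => y + 1))

-- ===== PRECONDITION & SPEC =====
-- Pre_ excludes negative x, outside the encoding's natural domain of non-negative integers: there the
-- stray 'b' from bin(x)[2:] makes A's value an accident of the string representation — usually a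
-- ValueError from int(.,2), sometimes an early break returning set(), sometimes a value parsed through
-- an accidental '0b' prefix — while B returns the empty set.
def Pre_make_zero_encoding (x : Int) (padding : Int) : Prop := 0 ≤ x
instance (x : Int) (padding : Int) : Decidable (Pre_make_zero_encoding x padding) := by unfold Pre_make_zero_encoding; infer_instance
def pvWitness_make_zero_encoding : Int × Int := (6, 256)

def Spec_make_zero_encoding (x : Int) (padding : Int) (out : List Int) : Prop := out = make_zero_encoding_alt x padding
instance (x : Int) (padding : Int) (out : List Int) : Decidable (Spec_make_zero_encoding x padding out) := by unfold Spec_make_zero_encoding; infer_instance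

-- ===== CLAIM (what is proved, stated in full; the proofs are below) =====
def Claim_equal_make_zero_encoding : Prop := ∀ (x : Int) (padding : Int), Dom_make_zero_encoding x padding → Pre_make_zero_encoding x padding → Spec_make_zero_encoding x padding (make_zero_encoding x padding)

-- ===== LEMMAS AND PROOFS =====

-- little-endian bit string of a Nat ([] for 0): (pyBinAux n).reverse
def leBits (n : Nat) : List Char :=
  if h : n = 0 then []
  else (if n % 2 = 1 then '1' else '0') :: leBits (n / 2)
  decreasing_by exact Nat.div_lt_self (Nat.pos_of_ne_zero h) one_lt_two

-- common recursion both programs reduce to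
def G (n : Nat) (acc : List Int) : List Int :=
  if h : n = 0 then acc
  else if n % 2 = 0 then G (n / 2) (PySem.Set.add acc (2 * ((n / 2 : Nat) : Int) + 1))
  else G (n / 2) acc
  decreasing_by all_goals exact Nat.div_lt_self (Nat.pos_of_ne_zero h) one_lt_two

theorem reverse_pyBinAux (n : Nat) : (pyBinAux n).reverse = leBits n := by
  induction n using Nat.strong_induction_on with
  | _ n ih =>
    by_cases h : n = 0
    · rw [pyBinAux, leBits]; simp [h]
    · rw [pyBinAux, leBits, dif_neg h, dif_neg h, List.reverse_append,
        ih (n / 2) (Nat.div_lt_self (Nat.pos_of_ne_zero h) one_lt_two)]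
      rfl

theorem loopA_replicate_zero (m : Nat) (acc : List Int) :
    loopA (List.replicate m '0') acc = acc := by
  cases m with
  | zero => rfl
  | succ k => simp [List.replicate_succ, loopA]

theorem one_mem_leBits (n : Nat) (h : n ≠ 0) : '1' ∈ leBits n := by
  induction n using Nat.strong_induction_on with
  | _ n ih =>
    rw [leBits, dif_neg h]
    by_cases hp : n % 2 = 1
    · rw [if_pos hp]; exact List.mem_cons_self
    · have hm : n / 2 ≠ 0 := by omega
      exact List.mem_cons_of_mem _
        (ih (n / 2) (Nat.div_lt_self (Nat.pos_of_ne_zero h) one_lt_two) hm)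

theorem foldl_parse_zero (k : Nat) :
    List.foldl (fun (a : Int) c => 2 * a + (if c = '1' then 1 else 0)) 0 (List.replicate k '0') = 0 := by
  induction k with
  | zero => rfl
  | succ m ih => simp [List.replicate_succ]; simpa using ih

theorem parse_leBits_rev (m : Nat) : parseBin (leBits m).reverse = (m : Int) := by
  induction m using Nat.strong_induction_on with
  | _ m ih =>
    by_cases h : m = 0
    · rw [leBits]; simp [h, parseBin]
    · rw [leBits, dif_neg h, List.reverse_cons]
      unfold parseBin at *
      rw [List.foldl_append,
        ih (m / 2) (Nat.div_lt_self (Nat.pos_of_ne_zero h) one_lt_two)]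
      simp only [List.foldl_cons, List.foldl_nil]
      by_cases hp : m % 2 = 1 <;> simp [hp] <;> omega

theorem parse_element (m k : Nat) :
    parseBin ('1' :: (leBits m ++ List.replicate k '0')).reverse = 2 * (m : Int) + 1 := by
  unfold parseBin
  rw [List.reverse_cons, List.reverse_append, List.reverse_replicate]
  rw [List.append_assoc, List.foldl_append, foldl_parse_zero, List.foldl_append]
  have := parse_leBits_rev m
  unfold parseBin at this
  rw [this]
  simp

theorem loopA_leBits (n : Nat) : ∀ (k : Nat) (acc : List Int),
    loopA (leBits n ++ List.replicate k '0') acc = G n acc := by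
  induction n using Nat.strong_induction_on with
  | _ n ih =>
    intro k acc
    by_cases h0 : n = 0
    · subst h0
      rw [leBits, G]; simp
      exact loopA_replicate_zero k acc
    · have hlt : n / 2 < n := Nat.div_lt_self (Nat.pos_of_ne_zero h0) one_lt_two
      rw [leBits, G, dif_neg h0, dif_neg h0, List.cons_append]
      by_cases hp : n % 2 = 1
      · have hp' : ¬ n % 2 = 0 := by omega
        rw [if_pos hp, if_neg hp']
        simp only [loopA]
        rw [if_neg (by decide : ¬ ('1' : Char) = '0')]
        exact ih (n / 2) hlt k acc
      · have hp' : n % 2 = 0 := by omega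
        have hm : n / 2 ≠ 0 := by omega
        rw [if_neg hp, if_pos hp']
        simp only [loopA, if_true]
        have hnz : ¬ (leBits (n / 2) ++ List.replicate k '0'
            = List.replicate (leBits (n / 2) ++ List.replicate k '0').length '0') := by
          intro hEq
          have h1 : '1' ∈ leBits (n / 2) ++ List.replicate k '0' :=
            List.mem_append_left _ (one_mem_leBits _ hm)
          rw [hEq] at h1
          have := List.eq_of_mem_replicate h1
          exact absurd this (by decide)
        rw [if_neg hnz, parse_element]
        exact ih (n / 2) hlt k _

-- B-side: the chain/comprehension pipeline also reduces to G
theorem chain_fold_eq_G (n : Nat) : ∀ acc : List Int,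
    List.foldl PySem.Set.add acc
      (((chainB (n : Int)).filter (fun y => PySem.Int.mod y 2 = 0)).map (fun y => y + 1))
      = G n acc := by
  induction n using Nat.strong_induction_on with
  | _ n ih =>
    intro acc
    by_cases h0 : n = 0
    · subst h0
      rw [chainB, G]; simp
    · have hlt : n / 2 < n := Nat.div_lt_self (Nat.pos_of_ne_zero h0) one_lt_two
      have hpos : (0 : Int) < (n : Int) := by exact_mod_cast Nat.pos_of_ne_zero h0
      rw [chainB, dif_pos hpos]
      have hdiv : PySem.Int.floordiv (n : Int) 2 = ((n / 2 : Nat) : Int) := by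
        exact_mod_cast PySem.Int.floordiv_natCast n 2
      have hmod : PySem.Int.mod (n : Int) 2 = ((n % 2 : Nat) : Int) := by
        exact_mod_cast PySem.Int.mod_natCast n 2
      rw [hdiv, List.filter_cons]
      conv_rhs => rw [G, dif_neg h0]
      by_cases hp : n % 2 = 0
      · rw [if_pos (by rw [hmod, hp]; simp), List.map_cons, List.foldl_cons]
        have he : (n : Int) + 1 = 2 * ((n / 2 : Nat) : Int) + 1 := by
          have : n = 2 * (n / 2) := by omega
          push_cast
          omega
        rw [if_pos hp, he]
        exact ih (n / 2) hlt _
      · rw [if_neg (by rw [hmod]; simp; omega), if_neg hp]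
        exact ih (n / 2) hlt acc

theorem B_eq_G (x : Int) (hx : 0 ≤ x) :
    make_zero_encoding_alt x 256 = G x.toNat PySem.Set.empty := by
  have hcast : x = ((x.toNat : Nat) : Int) := (Int.toNat_of_nonneg hx).symm
  unfold make_zero_encoding_alt
  rw [PySem.Set.ofList_eq_foldl, hcast]
  exact chain_fold_eq_G x.toNat PySem.Set.empty

theorem altIndepPadding (x : Int) (p q : Int) :
    make_zero_encoding_alt x p = make_zero_encoding_alt x q := rfl

-- ===== VERDICT (by name: the statement is the Claim_ definition above) =====
theorem make_zero_encoding_spec : Claim_equal_make_zero_encoding := by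
  intro x padding _ hx
  have hx' : (0:Int) ≤ x := hx
  unfold Spec_make_zero_encoding
  rw [altIndepPadding x padding 256, B_eq_G x hx']
  unfold make_zero_encoding
  simp only []
  rw [List.reverse_append, List.reverse_replicate]
  by_cases h0 : x = 0
  · subst h0
    show loopA (List.reverse ['0'] ++ List.replicate _ '0') _ = _
    rw [G]
    simp [pyBin]
    rw [← List.replicate_succ]
    exact loopA_replicate_zero _ _
  · have hn : x.toNat ≠ 0 := by
      intro h; apply h0; omega
    show loopA ((pyBin x).reverse ++ List.replicate _ '0') _ = _
    rw [pyBin, if_neg h0, reverse_pyBinAux]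
    exact loopA_leBits x.toNat _ PySem.Set.empty
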